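-- pv_equiv track=rewrite | github.com/Th0rgal/dumbcontracts | research/lean_only_proto/tools/compare_evm_asm.py | match_blocks
-- ===== SOURCE A (Python) =====
-- from typing import Dict, List
--
-- def match_blocks(direct: Dict[str, List[str]], solc: Dict[str, List[str]]):
--     matches = {}
--     for dlabel, dops in direct.items():
--         candidates = []
--         for slabel, sops in solc.items():
--             if dops == sops:
--                 candidates.append(slabel)
--         matches[dlabel] = candidates
--     return matches
-- ===== SOURCE B (Python) =====
-- def match_blocks(direct, solc):
--     # Build an index: op-sequence -> labels of solc blocks with that sequence,
--     # then answer each direct block with a single lookup.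
--     index = {}
--     for slabel, sops in solc.items():
--         index.setdefault(tuple(sops), []).append(slabel)
--     return {dlabel: list(index.get(tuple(dops), [])) for dlabel, dops in direct.items()}
-- ===== Notes on version B (the rewrite author's own statement) =====
-- stated objective: faster
-- what changed: B builds a hash index from op-sequence to solc labels once, replacing A's inner scan over all solc blocks per direct block with a single dict lookup.
import Mathlib
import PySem

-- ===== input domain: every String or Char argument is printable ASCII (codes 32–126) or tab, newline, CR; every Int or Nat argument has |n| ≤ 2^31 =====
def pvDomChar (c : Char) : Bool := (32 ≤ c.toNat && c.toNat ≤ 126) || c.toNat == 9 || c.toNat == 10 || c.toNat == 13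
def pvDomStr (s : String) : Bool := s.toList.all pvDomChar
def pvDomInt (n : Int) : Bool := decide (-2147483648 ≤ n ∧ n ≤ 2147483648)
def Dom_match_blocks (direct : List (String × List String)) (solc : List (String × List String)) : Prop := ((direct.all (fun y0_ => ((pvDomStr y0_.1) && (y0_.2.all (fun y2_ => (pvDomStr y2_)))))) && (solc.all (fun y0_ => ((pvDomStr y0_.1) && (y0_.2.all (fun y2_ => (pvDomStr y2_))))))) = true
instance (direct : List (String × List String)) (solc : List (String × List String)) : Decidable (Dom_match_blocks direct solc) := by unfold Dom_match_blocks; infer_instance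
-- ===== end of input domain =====

-- B replaces A's inner scan over solc per direct block with an index keyed by op
-- sequence, built once (O(D*S*L) -> O((D+S)*L)); equivalence of RETURN values.

-- ===== PORT A =====
def match_blocks (direct : List (String × List String)) (solc : List (String × List String)) : List (String × List String) :=
  -- matches = {}; for dlabel, dops in direct.items(): candidates = [...]; matches[dlabel] = candidates
  (direct.foldl
    (fun (acc : PySem.Dict String (List String)) dp =>
      acc.insert dp.1
        (solc.foldl (fun candidates sp =>
            if dp.2 == sp.2 then candidates ++ [sp.1] else candidates) []))
    PySem.Dict.empty).items

-- ===== PORT B =====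
def match_blocks_alt (direct : List (String × List String)) (solc : List (String × List String)) : List (String × List String) :=
  -- index = {}; for slabel, sops in solc.items(): index.setdefault(sops, []).append(slabel)
  let index : PySem.Dict (List String) (List String) :=
    solc.foldl (fun d sp => d.modify sp.2 [] (· ++ [sp.1])) PySem.Dict.empty
  -- {dlabel: list(index.get(dops, [])) for dlabel, dops in direct.items()}
  (direct.foldl
    (fun (out : PySem.Dict String (List String)) dp =>
      out.insert dp.1 (index.getD dp.2 []))
    PySem.Dict.empty).items

-- ===== PRECONDITION & SPEC =====
def Spec_match_blocks (direct : List (String × List String)) (solc : List (String × List String)) (out : List (String × List String)) : Prop := out = match_blocks_alt direct solc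
instance (direct : List (String × List String)) (solc : List (String × List String)) (out : List (String × List String)) : Decidable (Spec_match_blocks direct solc out) := by unfold Spec_match_blocks; infer_instance

-- ===== CLAIM (what is proved, stated in full; the proofs are below) =====
def Claim_equal_match_blocks : Prop := ∀ (direct : List (String × List String)) (solc : List (String × List String)), Dom_match_blocks direct solc → Spec_match_blocks direct solc (match_blocks direct solc)

-- ===== LEMMAS AND PROOFS =====

-- B's index lookup for a given op sequence equals A's inner filtering scan.
theorem index_getD_eq (solc : List (String × List String)) (dops : List String) :
    (solc.foldl (fun d sp => d.modify sp.2 [] (· ++ [sp.1])) PySem.Dict.empty).getD dops []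
      = solc.foldl (fun candidates sp =>
          if dops == sp.2 then candidates ++ [sp.1] else candidates) [] := by
  have h1 : (solc.foldl (fun d sp => d.modify sp.2 [] (· ++ [sp.1])) PySem.Dict.empty)
      = ((solc.map Prod.swap).foldl (fun d p => d.modify p.1 [] (· ++ [p.2])) PySem.Dict.empty) := by
    rw [List.foldl_map]; rfl
  rw [h1, PySem.Dict.getD_foldl_modify_append, PySem.Dict.getD_empty,
      PySem.List.foldl_append_if (fun sp => dops == sp.2) Prod.fst,
      List.filter_map]
  simp only [Function.comp_def, List.map_map, Prod.fst_swap, Prod.snd_swap]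
  have hf : (solc.filter (fun x => x.2 == dops)) = solc.filter (fun sp => dops == sp.2) :=
    List.filter_congr (fun p _ => by simp [eq_comm])
  rw [hf]

-- ===== VERDICT (by name: the statement is the Claim_ definition above) =====
theorem match_blocks_spec : Claim_equal_match_blocks := by
  intro direct solc _
  show match_blocks direct solc = match_blocks_alt direct solc
  unfold match_blocks match_blocks_alt
  simp only [index_getD_eq]
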